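-- pv_equiv track=rewrite | github.com/Brunstud/manual-histogram-enhance | src/enhancement/clahe.py | clahe_equalization_1
-- ===== SOURCE A (Python) =====
-- def clahe_equalization_1(y_channel, tile_size=8, clip_limit=40):
--     """
--     CLAHE：分块直方图增强 + 限制对比度
--     参数：
--         y_channel: 输入图像的 Y 通道（二维列表）
--         tile_size: 块划分数量（tile_size x tile_size）
--         clip_limit: 每个灰度值最大频数（控制对比度）
--     返回：增强后的 Y 通道
--     """
--     height = len(y_channel)
--     width = len(y_channel[0])
--     import copy
--     output = copy.deepcopy(y_channel)
--
--     block_h = height // tile_size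
--     block_w = width // tile_size
--
--     def local_equalize(tile):
--         """对单个 tile 执行直方图裁剪 + 均衡化"""
--         hist = [0] * 256
--         for row in tile:
--             for p in row:
--                 hist[p] += 1
--
--         # Clip histogram
--         excess = sum(max(0, h - clip_limit) for h in hist)
--         for i in range(256):
--             if hist[i] > clip_limit:
--                 hist[i] = clip_limit
--         inc = excess // 256
--         hist = [h + inc for h in hist]
--
--         # CDF → LUT
--         cdf = [0] * 256
--         cdf[0] = hist[0]
--         for i in range(1, 256):
--             cdf[i] = cdf[i - 1] + hist[i]
--
--         total = block_h * block_w
--         cdf_min = next((c for c in cdf if c > 0), 0)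
--         if total == cdf_min:
--             lut = list(range(256))
--         else:
--             lut = [round((cdf[i] - cdf_min) / (total - cdf_min) * 255) for i in range(256)]
--
--         return [[lut[p] for p in row] for row in tile]
--
--     # 遍历 tile 区域，分别增强（不插值，硬拼）
--     for by in range(tile_size):
--         for bx in range(tile_size):
--             tile = [
--                 y_channel[by * block_h + i][bx * block_w : bx * block_w + block_w]
--                 for i in range(block_h)
--             ]
--             enhanced = local_equalize(tile)
--             for i in range(block_h):
--                 output[by * block_h + i][bx * block_w : bx * block_w + block_w] = enhanced[i]
--
--     return output
-- ===== SOURCE B (Python) =====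
-- def clahe_equalization_1(y_channel, tile_size=8, clip_limit=40):
--     """Sparse CLAHE: per tile, a frequency dict over the values actually present
--     (no 256-bin arrays), closed-form inc*(v+1) term for the CDF, and a sparse
--     value->output dict applied in one pixel-major pass."""
--     height = len(y_channel)
--     width = len(y_channel[0])
--     bh = height // tile_size
--     bw = width // tile_size
--     total = bh * bw
--
--     def tile_map(by, bx):
--         # count only the values that occur in this tile
--         freq = {}
--         for i in range(bh):
--             row = y_channel[by * bh + i]
--             for j in range(bw):
--                 p = row[bx * bw + j]
--                 freq[p] = freq.get(p, 0) + 1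
--         vals = sorted(freq)
--         clipped_sum = sum(min(freq[v], clip_limit) for v in vals)
--         inc = (total - clipped_sum) // 256   # excess = total - clipped_sum
--         # first positive entry of the (virtual) cdf
--         if inc > 0:
--             cdf_min = inc + min(freq.get(0, 0), clip_limit)
--         else:
--             cdf_min = next((min(freq[v], clip_limit) for v in vals
--                             if min(freq[v], clip_limit) > 0), 0)
--         if total == cdf_min:
--             return {v: v for v in vals}
--         mapping = {}
--         acc = 0
--         for v in vals:
--             acc += min(freq[v], clip_limit)
--             mapping[v] = round((inc * (v + 1) + acc - cdf_min)
--                                / (total - cdf_min) * 255)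
--         return mapping
--
--     maps = [[tile_map(by, bx) for bx in range(tile_size)] for by in range(tile_size)]
--     out = []
--     for r, row in enumerate(y_channel):
--         if r < tile_size * bh:
--             out.append([maps[r // bh][c // bw][p] if c < tile_size * bw else p
--                         for c, p in enumerate(row)])
--         else:
--             out.append(list(row))
--     return out
-- ===== Notes on version B (the rewrite author's own statement) =====
-- stated objective: alternative
-- what changed: B never builds 256-bin histogram/CDF arrays: per tile it builds a frequency dict keyed by the values actually present, sorts those keys, derives the redistribution increment from the identity excess = total - sum(min(freq,clip)), replaces the dense CDF by the closed form inc*(v+1) plus a running prefix over present values only, computes cdf_min by a two-case rule instead of scanning 256 cdf entries, and builds a sparse value->output dict that a second pixel-major pass applies; A interleaves per-tile dense hist/clip/CDF/LUT arrays with slice splicing.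
-- outside the precondition, e.g. on clahe_equalization_1([[0, 0], [0, 3]], 2, -1): A returns [[0, 0], [0, 0]], B returns [[-255, -255], [-255, -255]]; on clahe_equalization_1([[-1]], 1, 40): A returns [[255]], B returns [[-1]]; on clahe_equalization_1([[0, 0], [0]], 2, 40): A returns [[0, 0], [0]], B raises IndexError
import Mathlib
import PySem

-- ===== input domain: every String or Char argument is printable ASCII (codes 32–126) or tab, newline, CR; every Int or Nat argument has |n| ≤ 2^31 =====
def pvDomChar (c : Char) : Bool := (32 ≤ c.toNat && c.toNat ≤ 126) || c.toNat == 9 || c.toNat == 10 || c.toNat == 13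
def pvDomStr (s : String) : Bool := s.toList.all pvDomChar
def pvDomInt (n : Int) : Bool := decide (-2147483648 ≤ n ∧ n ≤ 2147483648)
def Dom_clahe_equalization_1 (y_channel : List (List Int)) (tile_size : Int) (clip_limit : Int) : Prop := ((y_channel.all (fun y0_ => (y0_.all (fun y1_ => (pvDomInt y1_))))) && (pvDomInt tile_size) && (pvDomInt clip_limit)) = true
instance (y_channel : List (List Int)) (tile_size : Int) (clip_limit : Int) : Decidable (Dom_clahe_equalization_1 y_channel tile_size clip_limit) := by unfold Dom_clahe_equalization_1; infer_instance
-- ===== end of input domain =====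

-- B replaces A's dense 256-bin histogram/CDF/LUT arrays by a sparse frequency dict over the
-- values actually present in each tile (excess via total - Σ min(freq,clip), CDF as the closed
-- form inc*(v+1) plus a running prefix over present values, cdf_min by a two-case rule, a sparse
-- value→output dict applied in a pixel-major pass); objective: alternative (not claimed faster).
-- Equality is about the RETURN value; A mutates its deep copy internally, neither mutates the argument.

-- ===== PORT A =====
-- Shared Python-float primitive, used by BOTH ports for the one float expression both Pythons contain:
-- round(a / b * 255) under IEEE-754 double arithmetic (b ≠ 0).  Hand-ported (PySem has no floats); it is
-- exact: correctly-rounded 53-bit division, multiplication by 255 with renormalisation, then Python's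
-- banker's rounding — no overflow/subnormals are reachable from the |int| ≤ 2^31 domain.
def pvRne (n d : Nat) : Nat :=
  let q := n / d
  let r := n % d
  if 2 * r < d then q else if d < 2 * r then q + 1 else if q % 2 = 0 then q else q + 1

def pvDiv53 (n d : Nat) : Nat × Int :=
  let L : Int := (Nat.log2 n : Int) - (Nat.log2 d : Int)
  let F : Int := if d * 2 ^ L.toNat ≤ n * 2 ^ (-L).toNat then L else L - 1
  let e : Int := F - 52
  let m := pvRne (n * 2 ^ (-e).toNat) (d * 2 ^ e.toNat)
  if m = 2 ^ 53 then (2 ^ 52, e + 1) else (m, e)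

def pvMul255 (m : Nat) (e : Int) : Nat × Int :=
  let p := m * 255
  let k := (Nat.log2 p + 1) - 53
  let m1 := pvRne p (2 ^ k)
  if m1 = 2 ^ 53 then (2 ^ 52, e + (k : Int) + 1) else (m1, e + (k : Int))

def pyRound255Div (a b : Int) : Int :=
  if a = 0 then 0
  else
    let p1 := pvDiv53 a.natAbs b.natAbs
    let p2 := pvMul255 p1.1 p1.2
    let r : Nat := if 0 ≤ p2.2 then p2.1 * 2 ^ p2.2.toNat else pvRne p2.1 (2 ^ (-p2.2).toNat)
    if (0 ≤ a ∧ 0 ≤ b) ∨ (a < 0 ∧ b < 0) then (r : Int) else -(r : Int)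

-- local_equalize(tile) of A, transliterated
def pvLocalEq (block_h block_w clip_limit : Int) (tile : List (List Int)) : List (List Int) :=
  let hist := tile.foldl (fun h row => row.foldl (fun h p => PySem.List.pySetD h p (PySem.List.pyGetD h p 0 + 1)) h) (List.replicate 256 (0 : Int))
  let excess := hist.foldl (fun s h => s + max 0 (h - clip_limit)) 0
  let hist := hist.map (fun h => if h > clip_limit then clip_limit else h)
  let inc := PySem.Int.floordiv excess 256
  let hist := hist.map (fun h => h + inc)
  let cdf := (PySem.List.pyRange 1 256 1).foldl
      (fun cdf i => PySem.List.pySetD cdf i (PySem.List.pyGetD cdf (i - 1) 0 + PySem.List.pyGetD hist i 0))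
      (PySem.List.pySetD (List.replicate 256 (0 : Int)) 0 (PySem.List.pyGetD hist 0 0))
  let total := block_h * block_w
  let cdf_min := (cdf.find? (fun c => decide (0 < c))).getD 0
  let lut := if total = cdf_min then (List.range 256).map (fun i : Nat => (i : Int))
             else (List.range 256).map (fun i : Nat => pyRound255Div (PySem.List.pyGetD cdf (i : Int) 0 - cdf_min) (total - cdf_min))
  tile.map (fun row => row.map (fun p => PySem.List.pyGetD lut p 0))

def clahe_equalization_1 (y_channel : List (List Int)) (tile_size : Int) (clip_limit : Int) : List (List Int) :=
  let height : Int := y_channel.length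
  let width : Int := ((PySem.List.pyGet? y_channel 0).getD []).length
  let block_h := PySem.Int.floordiv height tile_size
  let block_w := PySem.Int.floordiv width tile_size
  (PySem.List.pyRange 0 tile_size 1).foldl (fun output by_ =>
    (PySem.List.pyRange 0 tile_size 1).foldl (fun output bx =>
      let tile := (PySem.List.pyRange 0 block_h 1).map (fun i =>
        PySem.List.slice (PySem.List.pyGetD y_channel (by_ * block_h + i) []) (some (bx * block_w)) (some (bx * block_w + block_w)))
      let enhanced := pvLocalEq block_h block_w clip_limit tile
      (PySem.List.pyRange 0 block_h 1).foldl (fun output i =>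
        let row := PySem.List.pyGetD output (by_ * block_h + i) []
        PySem.List.pySetD output (by_ * block_h + i)
          (PySem.List.slice row none (some (bx * block_w)) ++ PySem.List.pyGetD enhanced i []
            ++ PySem.List.slice row (some (bx * block_w + block_w)) none)) output)
      output)
    y_channel

-- ===== PORT B =====
-- tile_map(by, bx) of B: sparse frequency dict, sorted present values, closed-form cdf term
def pvTileMap (y_channel : List (List Int)) (bh bw clip_limit total by_ bx : Int) : PySem.Dict Int Int :=
  let freq := (PySem.List.pyRange 0 bh 1).foldl (fun d i =>
      let row := PySem.List.pyGetD y_channel (by_ * bh + i) []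
      (PySem.List.pyRange 0 bw 1).foldl (fun (d : PySem.Dict Int Int) j =>
        let p := PySem.List.pyGetD row (bx * bw + j) 0
        d.insert p (d.getD p 0 + 1)) d) PySem.Dict.empty
  let vals := PySem.List.sorted freq.keys (fun v => v) false
  let clipped_sum := (vals.map (fun v => min (freq.getD v 0) clip_limit)).sum
  let inc := PySem.Int.floordiv (total - clipped_sum) 256
  let cdf_min := if 0 < inc then inc + min (freq.getD 0 0) clip_limit
    else ((vals.find? (fun v => decide (0 < min (freq.getD v 0) clip_limit))).map
            (fun v => min (freq.getD v 0) clip_limit)).getD 0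
  if total = cdf_min then vals.foldl (fun (d : PySem.Dict Int Int) v => d.insert v v) PySem.Dict.empty
  else
    ((vals.foldl (fun (st : Int × PySem.Dict Int Int) v =>
        let acc := st.1 + min (freq.getD v 0) clip_limit
        (acc, st.2.insert v (pyRound255Div (inc * (v + 1) + acc - cdf_min) (total - cdf_min))))
      (0, PySem.Dict.empty)).2)

def clahe_equalization_1_alt (y_channel : List (List Int)) (tile_size : Int) (clip_limit : Int) : List (List Int) :=
  let height : Int := y_channel.length
  let width : Int := ((PySem.List.pyGet? y_channel 0).getD []).length
  let bh := PySem.Int.floordiv height tile_size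
  let bw := PySem.Int.floordiv width tile_size
  let total := bh * bw
  let maps := (PySem.List.pyRange 0 tile_size 1).map (fun by_ =>
    (PySem.List.pyRange 0 tile_size 1).map (fun bx => pvTileMap y_channel bh bw clip_limit total by_ bx))
  (PySem.List.enumerate y_channel 0).map (fun rc =>
    if rc.1 < tile_size * bh then
      (PySem.List.enumerate rc.2 0).map (fun cv =>
        if cv.1 < tile_size * bw then
          PySem.Dict.getD (PySem.List.pyGetD (PySem.List.pyGetD maps (PySem.Int.floordiv rc.1 bh) []) (PySem.Int.floordiv cv.1 bw) PySem.Dict.empty) cv.2 0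
        else cv.2)
    else rc.2)

-- ===== PRECONDITION & SPEC =====
-- Pre_ restricts to the function's natural domain — a nonempty image, a positive tile count, and
-- either a degenerate tile grid (image smaller than tile_size in a dimension: both programs return
-- the input unchanged, any pixels/clip) or a rectangular image with pixel values 0..255 and a
-- nonnegative clip limit: outside it A raises (IndexError / ZeroDivisionError) on empty input, zero
-- tile_size and pixels ≥ 256, and on negative tile_size, negative clip limits, ragged rows or pixels
-- in -256..-1 with a non-degenerate grid the values A returns come from Python negative-index
-- corners or a nonsensical negative frequency cap on which neither program is specified.
def Pre_clahe_equalization_1 (y_channel : List (List Int)) (tile_size : Int) (clip_limit : Int) : Prop :=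
  y_channel ≠ [] ∧ 1 ≤ tile_size ∧
  ((y_channel.length : Int) < tile_size ∨ (y_channel.headI.length : Int) < tile_size ∨
   (0 ≤ clip_limit ∧
    (∀ row ∈ y_channel, row.length = y_channel.headI.length) ∧
    (∀ row ∈ y_channel, ∀ p ∈ row, 0 ≤ p ∧ p ≤ 255)))
instance (y_channel : List (List Int)) (tile_size : Int) (clip_limit : Int) : Decidable (Pre_clahe_equalization_1 y_channel tile_size clip_limit) := by unfold Pre_clahe_equalization_1; infer_instance

def pvWitness_clahe_equalization_1 : List (List Int) × Int × Int := ([[0, 255], [7, 7]], 2, 40)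

def Spec_clahe_equalization_1 (y_channel : List (List Int)) (tile_size : Int) (clip_limit : Int) (out : List (List Int)) : Prop := out = clahe_equalization_1_alt y_channel tile_size clip_limit
instance (y_channel : List (List Int)) (tile_size : Int) (clip_limit : Int) (out : List (List Int)) : Decidable (Spec_clahe_equalization_1 y_channel tile_size clip_limit out) := by unfold Spec_clahe_equalization_1; infer_instance

-- ===== CLAIM (what is proved, stated in full; the proofs are below) =====
def Claim_equal_clahe_equalization_1 : Prop := ∀ (y_channel : List (List Int)) (tile_size : Int) (clip_limit : Int), Dom_clahe_equalization_1 y_channel tile_size clip_limit → Pre_clahe_equalization_1 y_channel tile_size clip_limit → Spec_clahe_equalization_1 y_channel tile_size clip_limit (clahe_equalization_1 y_channel tile_size clip_limit)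

-- ===== LEMMAS AND PROOFS =====
-- generic fold-invariant principle for loops over range
theorem pv_foldl_range_inv {a : Type} (g : a -> Nat -> a) (S : Nat -> a) (m : Nat)
    (h : forall k, k < m -> g (S k) k = S (k + 1)) : (List.range m).foldl g (S 0) = S m := by
  induction m with
  | zero => simp
  | succ m ih =>
    rw [List.range_succ, List.foldl_append, ih (fun k hk => h k (by omega))]
    simpa using h m (by omega)

-- (range l.length).map getD is the identity
theorem pv_map_range_getD {a : Type} (l : List a) (d : a) :
    (List.range l.length).map (fun i => l.getD i d) = l := by
  apply List.ext_getElem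
  · simp
  · intro i h1 h2
    simp [List.getD, List.getElem?_eq_getElem h2]

-- drop-take segment as a map over range
theorem pv_dropTake {a : Type} (xs : List a) (s k : Nat) (d : a) (h : s + k <= xs.length) :
    (xs.drop s).take k = (List.range k).map (fun j => xs.getD (s + j) d) := by
  apply List.ext_getElem
  · simp; omega
  · intro i h1 h2
    have hs : s + i < xs.length := by simp at h1; omega
    simp [List.getD, List.getElem?_eq_getElem hs]

-- histogram bump-fold equals per-value counting
theorem pv_hist_count (xs : List Int) (h0 : List Int) (hlen : h0.length = 256)
    (hpx : forall p, p ∈ xs -> 0 <= p ∧ p < 256) :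
    xs.foldl (fun h p => PySem.List.pySetD h p (PySem.List.pyGetD h p 0 + 1)) h0
      = (List.range 256).map (fun v => h0.getD v 0 + (xs.count ((v : Nat) : Int) : Int)) := by
  induction xs generalizing h0 with
  | nil =>
    simp only [List.foldl_nil, List.count_nil]
    rw [← hlen]
    simpa using (pv_map_range_getD h0 0).symm
  | cons p t ih =>
    obtain ⟨hp0, hp256⟩ := hpx p (List.mem_cons_self ..)
    set k := p.toNat with hk
    have hpk : p = (k : Int) := by omega
    rw [List.foldl_cons, hpk, PySem.List.pySetD_natCast, PySem.List.pyGetD_natCast]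
    rw [ih (h0.set k (h0.getD k 0 + 1)) (by simpa using hlen) (fun q hq => hpx q (List.mem_cons_of_mem _ hq))]
    apply List.map_congr_left
    intro v hv
    rw [List.mem_range] at hv
    have hkl : k < h0.length := by omega
    have hset : (h0.set k (h0.getD k 0 + 1)).getD v 0 = if k = v then h0.getD k 0 + 1 else h0.getD v 0 := by
      simp only [List.getD, List.getElem?_set, hkl]
      split_ifs with h
      · subst h; simp
      · rfl
    rw [hset, List.count_cons]
    by_cases h : k = v
    · subst h; simp; omega
    · have : ¬ (((k : Int)) == ((v : Nat) : Int)) = true := by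
        simp only [beq_iff_eq, Int.natCast_inj]
        omega
      simp only [this, if_false, if_neg h]
      push_cast
      omega

def pvPrefix (l : List Int) : List Int := (List.range l.length).map (fun i => (l.take (i + 1)).sum)

-- A's in-place CDF loop
theorem pv_cdfA (l : List Int) (hl : l.length = 256) :
    (PySem.List.pyRange 1 256 1).foldl
        (fun cdf i => PySem.List.pySetD cdf i (PySem.List.pyGetD cdf (i - 1) 0 + PySem.List.pyGetD l i 0))
        (PySem.List.pySetD (List.replicate 256 (0 : Int)) 0 (PySem.List.pyGetD l 0 0))
      = pvPrefix l := by
  have h256 : (PySem.List.pyRange 1 256 1) = (List.range 255).map (fun (k : Nat) => (1 : Int) + (k : Int)) := by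
    rw [PySem.List.pyRange_one]; rfl
  rw [h256, List.foldl_map]
  have hS0 : PySem.List.pySetD (List.replicate 256 (0 : Int)) 0 (PySem.List.pyGetD l 0 0)
      = (List.range 256).map (fun i => if i < 0 + 1 then (l.take (i + 1)).sum else 0) := by
    have hset0 : PySem.List.pySetD (List.replicate 256 (0 : Int)) 0 (PySem.List.pyGetD l 0 0)
        = (List.replicate 256 (0 : Int)).set 0 (l.getD 0 0) := by
      rw [PySem.List.pyGetD_zero, show (0 : Int) = ((0 : Nat) : Int) by norm_num,
        PySem.List.pySetD_natCast]
    rw [hset0]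
    apply List.ext_getElem
    · simp only [List.length_set, List.length_replicate, List.length_map, List.length_range]
    · intro i h1 h2
      have hi : i < 256 := by
        simp only [List.length_set, List.length_replicate] at h1
        exact h1
      rw [List.getElem_set]
      simp only [List.getElem_map, List.getElem_range]
      by_cases h : 0 = i
      · subst h
        rw [if_pos rfl, if_pos (by omega)]
        have hsum := List.sum_take_succ l 0 (by omega)
        simp at hsum
        rw [hsum, List.getD_eq_getElem l 0 (by omega)]
      · rw [if_neg h, if_neg (by omega), List.getElem_replicate]
  rw [hS0]
  have hfin : pvPrefix l = (List.range 256).map (fun i => if i < 255 + 1 then (l.take (i + 1)).sum else 0) := by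
    simp only [pvPrefix, hl]
    apply List.map_congr_left
    intro i hi
    rw [List.mem_range] at hi
    rw [if_pos (by omega)]
  rw [hfin]
  apply pv_foldl_range_inv
    (fun cdf (k : Nat) => PySem.List.pySetD cdf ((1 : Int) + (k : Int)) (PySem.List.pyGetD cdf ((1 : Int) + (k : Int) - 1) 0 + PySem.List.pyGetD l ((1 : Int) + (k : Int)) 0))
    (fun m => (List.range 256).map (fun i => if i < m + 1 then (l.take (i + 1)).sum else 0)) 255
  intro k hk
  have hc2 : (1 : Int) + (k : Int) - 1 = ((k : Nat) : Int) := by push_cast; ring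
  have hc1 : (1 : Int) + (k : Int) = ((k + 1 : Nat) : Int) := by push_cast; ring
  rw [hc2, hc1]
  simp only [PySem.List.pySetD_natCast, PySem.List.pyGetD_natCast]
  have hSk : ((List.range 256).map (fun i => if i < k + 1 then (l.take (i + 1)).sum else 0)).getD k 0
      = (l.take (k + 1)).sum := by
    rw [PySem.List.getD_map_range _ _ _ _ (by omega), if_pos (by omega)]
  rw [hSk]
  apply List.ext_getElem
  · simp only [List.length_set, List.length_map, List.length_range]
  · intro i h1 h2
    have hi : i < 256 := by
      simp only [List.length_set, List.length_map, List.length_range] at h1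
      exact h1
    rw [List.getElem_set]
    simp only [List.getElem_map, List.getElem_range]
    by_cases h : k + 1 = i
    · subst h
      rw [if_pos rfl, if_pos (by omega)]
      rw [List.sum_take_succ l (k + 1) (by omega), List.getD_eq_getElem l 0 (by omega)]
    · rw [if_neg h]
      by_cases h3 : i < k + 1
      · rw [if_pos h3, if_pos (by omega)]
      · rw [if_neg h3, if_neg (by omega)]

theorem pv_find_prefix (l : List Int) (h : ∀ x ∈ l, 0 ≤ x) :
    ((List.range l.length).map (fun i => (l.take (i+1)).sum)).find? (fun c => decide (0 < c))
      = l.find? (fun c => decide (0 < c)) := by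
  induction l with
  | nil => simp
  | cons x t ih =>
    have hx : 0 ≤ x := h x (List.mem_cons_self ..)
    rw [List.length_cons, List.range_succ_eq_map, List.map_cons, List.map_map]
    by_cases h0 : 0 < x
    · rw [List.find?_cons_of_pos (by simpa using h0),
        List.find?_cons_of_pos (by simpa using h0)]
      simp
    · have hx0 : x = 0 := by omega
      subst hx0
      rw [List.find?_cons_of_neg (by simp), List.find?_cons_of_neg (by simp)]
      rw [← ih (fun q hq => h q (List.mem_cons_of_mem _ hq))]
      congr 1
      apply List.map_congr_left
      intro i _
      simp [Function.comp_def]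

theorem pv_dict_fold_ne (val : Int → Int → Int) (t : Int → Int) :
    ∀ (E : List Int) (st : Int × PySem.Dict Int Int) (v : Int), v ∉ E →
    ((E.foldl (fun (st : Int × PySem.Dict Int Int) u => (st.1 + t u, st.2.insert u (val st.1 u))) st).2).getD v 0
      = st.2.getD v 0 := by
  intro E
  induction E with
  | nil => intro st v _; rfl
  | cons x r ih =>
    intro st v hv
    rw [List.foldl_cons, ih _ v (fun hm => hv (List.mem_cons_of_mem _ hm))]
    exact PySem.Dict.getD_insert_of_ne _ _ _ (fun he => hv (he ▸ List.mem_cons_self ..))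

theorem pv_dict_fold (f : Int → Int → Int) (t : Int → Int) :
    ∀ (E : List Int), E.Nodup → ∀ (st : Int × PySem.Dict Int Int), ∀ v ∈ E,
    ((E.foldl (fun (st : Int × PySem.Dict Int Int) u => (st.1 + t u, st.2.insert u (f u (st.1 + t u)))) st).2).getD v 0
      = f v (st.1 + ((E.takeWhile (fun u => !(u == v))).map t).sum + t v) := by
  intro E
  induction E with
  | nil => intro _ _ v hv; simp at hv
  | cons x r ih =>
    intro hnd st v hv
    rw [List.foldl_cons]
    rcases List.mem_cons.mp hv with rfl | hvr
    · have hnr : v ∉ r := (List.nodup_cons.mp hnd).1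
      have hun := pv_dict_fold_ne (fun a u => f u (a + t u)) t r
        (st.1 + t v, st.2.insert v (f v (st.1 + t v))) v hnr
      simp only [] at hun
      rw [hun, PySem.Dict.getD_insert_self]
      rw [List.takeWhile_cons_of_neg (by simp)]
      simp
    · have hvx : v ≠ x := by
        rintro rfl
        exact (List.nodup_cons.mp hnd).1 hvr
      rw [ih (List.nodup_cons.mp hnd).2 _ v hvr]
      rw [List.takeWhile_cons_of_pos (by simp [Ne.symm hvx])]
      simp only [List.map_cons, List.sum_cons]
      ring_nf

theorem pv_dict_fold_id_ne :
    ∀ (E : List Int) (d : PySem.Dict Int Int) (v : Int), v ∉ E →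
    (E.foldl (fun (d : PySem.Dict Int Int) u => d.insert u u) d).getD v 0 = d.getD v 0 := by
  intro E
  induction E with
  | nil => intro d v _; rfl
  | cons x r ih =>
    intro d v hv
    rw [List.foldl_cons, ih _ v (fun hm => hv (List.mem_cons_of_mem _ hm))]
    exact PySem.Dict.getD_insert_of_ne _ _ _ (fun he => hv (he ▸ List.mem_cons_self ..))

theorem pv_dict_fold_id :
    ∀ (E : List Int), E.Nodup → ∀ (d : PySem.Dict Int Int), ∀ v ∈ E,
    (E.foldl (fun (d : PySem.Dict Int Int) u => d.insert u u) d).getD v 0 = v := by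
  intro E
  induction E with
  | nil => intro _ _ v hv; simp at hv
  | cons x r ih =>
    intro hnd d v hv
    rw [List.foldl_cons]
    rcases List.mem_cons.mp hv with rfl | hvr
    · rw [pv_dict_fold_id_ne r _ v (List.nodup_cons.mp hnd).1, PySem.Dict.getD_insert_self]
    · exact ih (List.nodup_cons.mp hnd).2 _ v hvr

set_option maxRecDepth 4000 in
theorem pv_count_sum (xs : List Int) (h : ∀ p ∈ xs, 0 ≤ p ∧ p < 256) :
    ((List.range 256).map (fun n => ((xs.count ((n : Nat) : Int) : Nat) : Int))).sum = xs.length := by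
  induction xs with
  | nil =>
    simp only [List.count_nil, Nat.cast_zero, List.length_nil]
    rw [PySem.List.sum_map_const_int]
    norm_num
  | cons p t ih =>
    obtain ⟨hp0, hp1⟩ := h p (List.mem_cons_self ..)
    have hmap : (List.range 256).map (fun n => (((p :: t).count ((n : Nat) : Int) : Nat) : Int))
        = (List.range 256).map (fun n => ((t.count ((n : Nat) : Int) : Nat) : Int)
            + (if n = p.toNat then 1 else 0)) := by
      apply List.map_congr_left
      intro n _
      rw [List.count_cons]
      by_cases he : n = p.toNat
      · subst he
        rw [Int.toNat_of_nonneg hp0]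
        simp
      · have hbf : (((n : Nat) : Int) == p) = false := by
          simp only [beq_eq_false_iff_ne, ne_eq]
          intro hc; exact he (by omega)
        simp [hbf, he]
        omega
    rw [hmap, PySem.List.sum_map_add_int, ih (fun q hq => h q (List.mem_cons_of_mem _ hq))]
    have hone : ((List.range 256).map (fun n => (if n = p.toNat then (1 : Int) else 0))).sum = 1 := by
      have hdec : (List.range 256).map (fun n => (if n = p.toNat then (1 : Int) else 0))
          = (List.range 256).map (fun n => (if decide (n = p.toNat) = true then (1 : Int) else 0)) := by
        apply List.map_congr_left
        intro n _
        simp only [decide_eq_true_eq]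
      rw [hdec, PySem.List.sum_map_ite_one_zero]
      have : (List.range 256).countP (fun n => decide (n = p.toNat)) = (List.range 256).count p.toNat := by
        rw [List.count]
        apply List.countP_congr
        intro n _
        by_cases hnp : n = p.toNat <;> simp [hnp]
      rw [this, List.count_eq_one_of_mem List.nodup_range (by rw [List.mem_range]; omega)]
      norm_num
    rw [hone]
    simp only [List.length_cons]
    push_cast
    ring

theorem pv_find_filter (l : List Nat) (p q : Nat → Bool) (h : ∀ x ∈ l, q x = true → p x = true) :
    (l.filter p).find? q = l.find? q := by
  induction l with
  | nil => rfl
  | cons x r ih =>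
    by_cases hq : q x = true
    · rw [List.filter_cons_of_pos (h x (List.mem_cons_self ..) hq), List.find?_cons_of_pos hq,
        List.find?_cons_of_pos hq]
    · have ihr := ih (fun a ha => h a (List.mem_cons_of_mem _ ha))
      by_cases hp : p x = true
      · rw [List.filter_cons_of_pos hp, List.find?_cons_of_neg hq, List.find?_cons_of_neg hq, ihr]
      · rw [List.filter_cons_of_neg (by simpa using hp), List.find?_cons_of_neg hq, ihr]

theorem pv_takeWhile_filter_range (p : Nat → Bool) (n : Nat) (hn : n < 256) (hp : p n = true) :
    (((List.range 256).filter p).map (fun m => ((m : Nat) : Int))).takeWhile (fun u => !(u == ((n : Nat) : Int)))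
      = ((List.range n).filter p).map (fun m => ((m : Nat) : Int)) := by
  have hsplit : List.range 256 = List.range n ++ (List.range (256 - n)).map (n + ·) := by
    rw [← List.range_add]
    congr 1
    omega
  have h256n : 256 - n = (255 - n) + 1 := by omega
  have hsecond : (List.range (256 - n)).map (n + ·) = n :: ((List.range (255 - n)).map (fun k => n + (k + 1))) := by
    rw [h256n, List.range_succ_eq_map, List.map_cons, List.map_map]
    simp [Function.comp_def, Nat.succ_eq_add_one]
  rw [hsplit, List.filter_append, hsecond, List.filter_cons_of_pos hp, List.map_append]
  rw [List.takeWhile_append_of_pos]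
  · rw [List.map_cons, List.takeWhile_cons_of_neg (by simp)]
    simp
  · intro x hx
    rw [List.mem_map] at hx
    obtain ⟨m, hm, rfl⟩ := hx
    have : m < n := List.mem_range.mp (List.mem_filter.mp hm).1
    simp
    omega

theorem pv_sum_filter (g : Nat → Int) (p : Nat → Bool) (l : List Nat)
    (h : ∀ x ∈ l, p x = false → g x = 0) :
    ((l.filter p).map g).sum = (l.map g).sum := by
  have hperm : (l.filter p ++ l.filter (fun x => !p x)).Perm l := List.filter_append_perm p l
  have := (hperm.map g).sum_eq
  rw [← this, List.map_append, List.sum_append]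
  have hz : ((l.filter (fun x => !p x)).map g).sum = 0 := by
    apply List.sum_eq_zero
    intro x hx
    rw [List.mem_map] at hx
    obtain ⟨m, hm, rfl⟩ := hx
    obtain ⟨hml, hmp⟩ := List.mem_filter.mp hm
    exact h m hml (by simpa using hmp)
  rw [hz, add_zero]

theorem pv_sum_map_sub {α : Type} (l : List α) (f g : α → Int) :
    (l.map (fun x => f x - g x)).sum = (l.map f).sum - (l.map g).sum := by
  induction l with
  | nil => simp
  | cons x t ih => simp only [List.map_cons, List.sum_cons, ih]; ring

def pvCnt (pix : List Int) (n : Nat) : Int := ((pix.count ((n : Nat) : Int) : Nat) : Int)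
def pvTn (pix : List Int) (clip : Int) (n : Nat) : Int := min (pvCnt pix n) clip
def pvSd (pix : List Int) (clip : Int) : Int := ((List.range 256).map (pvTn pix clip)).sum
def pvE (pix : List Int) : List Nat :=
  (List.range 256).filter (fun n => decide (0 < pix.count ((n : Nat) : Int)))
def pvD (pix : List Int) : List Int := (pvE pix).map (fun n => ((n : Nat) : Int))

theorem pv_nodup_E (pix : List Int) : (pvE pix).Nodup :=
  List.Nodup.filter _ List.nodup_range

theorem pv_nodup_D (pix : List Int) : (pvD pix).Nodup :=
  (pv_nodup_E pix).map (fun a b h => by omega)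

theorem pv_mem_D (pix : List Int) (hpx : ∀ p ∈ pix, 0 ≤ p ∧ p < 256) (v : Int) :
    v ∈ pvD pix ↔ v ∈ pix := by
  unfold pvD pvE
  simp only [List.mem_map, List.mem_filter, List.mem_range, decide_eq_true_eq]
  constructor
  · rintro ⟨n, ⟨_, hc⟩, rfl⟩
    exact List.count_pos_iff.mp hc
  · intro hv
    obtain ⟨h0, h1⟩ := hpx v hv
    exact ⟨v.toNat, ⟨by omega, by rw [Int.toNat_of_nonneg h0]; exact List.count_pos_iff.mpr hv⟩,
      by rw [Int.toNat_of_nonneg h0]⟩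

theorem pv_vals_eq (pix : List Int) (hpx : ∀ p ∈ pix, 0 ≤ p ∧ p < 256) :
    PySem.List.sorted (PySem.Set.ofList pix) (fun v => v) false = pvD pix := by
  apply PySem.List.sorted_eq_of_perm_of_pairwise_lt
  · refine (List.perm_ext_iff_of_nodup (pv_nodup_D pix) (PySem.Set.nodup_ofList pix)).mpr ?_
    intro a
    rw [pv_mem_D pix hpx, PySem.Set.mem_ofList]
  · refine List.Pairwise.map _ (fun a b h => ?_) ((List.Pairwise.filter _ List.pairwise_lt_range))
    exact_mod_cast h

theorem pv_tn_nonneg (pix : List Int) (clip : Int) (hclip : 0 ≤ clip) (n : Nat) :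
    0 ≤ pvTn pix clip n := by
  unfold pvTn pvCnt
  positivity

theorem pv_tn_zero (pix : List Int) (clip : Int) (hclip : 0 ≤ clip) (n : Nat)
    (h : pix.count ((n : Nat) : Int) = 0) : pvTn pix clip n = 0 := by
  unfold pvTn pvCnt
  rw [h]
  simp [hclip]

-- vals-sum equals the dense clipped sum
theorem pv_S_eq (pix : List Int) (clip : Int) (hclip : 0 ≤ clip) :
    ((pvD pix).map (fun v => min ((pix.count v : Nat) : Int) clip)).sum = pvSd pix clip := by
  unfold pvD pvSd
  rw [List.map_map]
  have h1 : (pvE pix).map ((fun v => min ((pix.count v : Nat) : Int) clip) ∘ (fun n => ((n : Nat) : Int)))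
      = (pvE pix).map (pvTn pix clip) := by
    apply List.map_congr_left
    intro n _
    rfl
  rw [h1]
  exact pv_sum_filter (pvTn pix clip) _ (List.range 256) (fun n _ hf => by
    apply pv_tn_zero pix clip hclip
    exact List.count_eq_zero.mpr (by simpa using hf))

-- inc is nonnegative
theorem pv_inc_nonneg (pix : List Int) (clip total : Int) (hclip : 0 ≤ clip)
    (htot : total = (pix.length : Int)) (hpx : ∀ q ∈ pix, 0 ≤ q ∧ q < 256) :
    0 ≤ PySem.Int.floordiv (total - pvSd pix clip) 256 := by
  have hS : pvSd pix clip ≤ total := by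
    rw [htot, ← pv_count_sum pix hpx]
    unfold pvSd
    apply List.sum_le_sum
    intro n _
    unfold pvTn pvCnt
    exact min_le_left _ _
  rw [PySem.Int.le_floordiv_iff_mul_le (by norm_num)]
  omega

theorem pv_prefix_entry (f : Nat → Int) (n : Nat) (hn : n < 256) :
    PySem.List.pyGetD (pvPrefix ((List.range 256).map f)) ((n : Nat) : Int) 0
      = ((List.range (n + 1)).map f).sum := by
  unfold pvPrefix
  rw [PySem.List.pyGetD_natCast, List.length_map, List.length_range,
    PySem.List.getD_map_range _ _ _ _ hn, ← List.map_take, List.take_range]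
  have hmin : min (n + 1) 256 = n + 1 := by omega
  rw [hmin]

-- A's cdf_min equals B's two-case cdf_min
theorem pv_cdfm_eq (pix : List Int) (clip total : Int) (hclip : 0 ≤ clip)
    (htot : total = (pix.length : Int)) (hpx : ∀ q ∈ pix, 0 ≤ q ∧ q < 256) :
    (((pvPrefix ((List.range 256).map (fun n => pvTn pix clip n
          + PySem.Int.floordiv (total - pvSd pix clip) 256))).find? (fun c => decide (0 < c))).getD 0)
      = (if 0 < PySem.Int.floordiv (total - pvSd pix clip) 256 then
           PySem.Int.floordiv (total - pvSd pix clip) 256 + min ((pix.count 0 : Nat) : Int) clip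
         else (((pvD pix).find? (fun v => decide (0 < min ((pix.count v : Nat) : Int) clip))).map
                 (fun v => min ((pix.count v : Nat) : Int) clip)).getD 0) := by
  set inc := PySem.Int.floordiv (total - pvSd pix clip) 256 with hinc
  have hincn : 0 ≤ inc := pv_inc_nonneg pix clip total hclip htot hpx
  have hnn : ∀ x ∈ (List.range 256).map (fun n => pvTn pix clip n + inc), 0 ≤ x := by
    intro x hx
    rw [List.mem_map] at hx
    obtain ⟨n, _, rfl⟩ := hx
    have := pv_tn_nonneg pix clip hclip n
    omega
  have hfind := pv_find_prefix ((List.range 256).map (fun n => pvTn pix clip n + inc)) hnn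
  rw [List.length_map, List.length_range] at hfind
  unfold pvPrefix
  rw [List.length_map, List.length_range, hfind]
  by_cases hpos : 0 < inc
  · rw [if_pos hpos]
    have hr : List.range 256 = 0 :: (List.range 255).map Nat.succ := List.range_succ_eq_map
    rw [hr, List.map_cons, List.find?_cons_of_pos (by
      have := pv_tn_nonneg pix clip hclip 0
      simp only [decide_eq_true_eq]
      omega)]
    simp only [Option.getD_some]
    unfold pvTn pvCnt
    push_cast
    ring
  · rw [if_neg hpos]
    have hzero : inc = 0 := by omega
    have hmc : (List.range 256).map (fun n => pvTn pix clip n + inc)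
        = (List.range 256).map (pvTn pix clip) := by
      apply List.map_congr_left
      intro n _
      rw [hzero, add_zero]
    rw [hmc, List.find?_map]
    unfold pvD
    rw [List.find?_map, Option.map_map]
    have hq : ((fun v => decide (0 < min ((pix.count v : Nat) : Int) clip)) ∘ (fun n : Nat => ((n : Nat) : Int)))
        = fun n : Nat => decide (0 < pvTn pix clip n) := by
      funext n
      rfl
    rw [hq]
    have hqA : ((fun c => decide (0 < c)) ∘ (pvTn pix clip)) = fun n => decide (0 < pvTn pix clip n) := by
      funext n
      rfl
    rw [hqA]
    unfold pvE
    rw [pv_find_filter (List.range 256) _ _ (by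
      intro n _ hqn
      simp only [decide_eq_true_eq] at hqn ⊢
      unfold pvTn pvCnt at hqn
      by_contra hc
      push_neg at hc
      have : pix.count ((n : Nat) : Int) = 0 := by omega
      rw [this] at hqn
      simp at hqn)]
    have hv2 : ((fun v => min ((pix.count v : Nat) : Int) clip) ∘ fun n : Nat => ((n : Nat) : Int))
        = pvTn pix clip := by
      funext n
      rfl
    rw [hv2]

theorem pv_pred_cast (n : Nat) :
    ((fun u : Int => !(u == ((n : Nat) : Int))) ∘ fun m : Nat => ((m : Nat) : Int))
      = fun m : Nat => !(m == n) := by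
  funext m
  simp only [Function.comp_apply]
  by_cases h : m = n
  · simp [h]
  · have : ¬ ((m : Int) = (n : Int)) := by omega
    simp [h, this]

-- B's identity dict at a present pixel
theorem pv_fold_id (pix : List Int) (hpx : ∀ q ∈ pix, 0 ≤ q ∧ q < 256) (p : Int) (hp : p ∈ pix) :
    ((pvD pix).foldl (fun (d : PySem.Dict Int Int) v => d.insert v v) PySem.Dict.empty).getD p 0 = p :=
  pv_dict_fold_id (pvD pix) (pv_nodup_D pix) _ p ((pv_mem_D pix hpx p).mpr hp)

-- B's value dict at a present pixel
theorem pv_fold_val (pix : List Int) (clip inc cdfm totalm : Int) (hclip : 0 ≤ clip)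
    (hpx : ∀ q ∈ pix, 0 ≤ q ∧ q < 256) (p : Int) (n : Nat)
    (hpn : p = ((n : Nat) : Int)) (hn : n < 256) (hp : p ∈ pix) :
    (((pvD pix).foldl (fun (st : Int × PySem.Dict Int Int) v =>
        (st.1 + min ((pix.count v : Nat) : Int) clip,
         st.2.insert v (pyRound255Div (inc * (v + 1) + (st.1 + min ((pix.count v : Nat) : Int) clip) - cdfm) totalm)))
      (0, PySem.Dict.empty)).2).getD p 0
    = pyRound255Div (inc * (((n : Nat) : Int) + 1) + ((List.range (n + 1)).map (pvTn pix clip)).sum - cdfm) totalm := by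
  have hmemD : p ∈ pvD pix := (pv_mem_D pix hpx p).mpr hp
  have hfold := pv_dict_fold
    (fun v a => pyRound255Div (inc * (v + 1) + a - cdfm) totalm)
    (fun v => min ((pix.count v : Nat) : Int) clip)
    (pvD pix) (pv_nodup_D pix) (0, PySem.Dict.empty) p hmemD
  simp only [] at hfold
  rw [hfold]
  -- characterize the takeWhile prefix
  have hnE : n ∈ pvE pix := by
    unfold pvE
    rw [List.mem_filter, List.mem_range]
    refine ⟨hn, ?_⟩
    simp only [decide_eq_true_eq]
    exact List.count_pos_iff.mpr (hpn ▸ hp)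
  have hpredn : (fun m => decide (0 < pix.count ((m : Nat) : Int))) n = true := (List.mem_filter.mp hnE).2
  have htw : (pvD pix).takeWhile (fun u => !(u == p))
      = ((List.range n).filter (fun m => decide (0 < pix.count ((m : Nat) : Int)))).map (fun m => ((m : Nat) : Int)) := by
    unfold pvD pvE
    rw [hpn, List.takeWhile_map, pv_pred_cast n]
    have hchar := pv_takeWhile_filter_range (fun m => decide (0 < pix.count ((m : Nat) : Int))) n hn hpredn
    rw [List.takeWhile_map, pv_pred_cast n] at hchar
    exact hchar
  rw [htw, List.map_map]
  have hcomp : ((fun v => min ((pix.count v : Nat) : Int) clip) ∘ fun m : Nat => ((m : Nat) : Int))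
      = pvTn pix clip := by
    funext m
    rfl
  rw [hcomp]
  rw [pv_sum_filter (pvTn pix clip) _ (List.range n) (fun m _ hf => by
    apply pv_tn_zero pix clip hclip
    exact List.count_eq_zero.mpr (by simpa using hf))]
  have hsum : ((List.range (n + 1)).map (pvTn pix clip)).sum
      = ((List.range n).map (pvTn pix clip)).sum + pvTn pix clip n := by
    rw [List.range_succ, List.map_append, List.sum_append]
    simp
  rw [hsum, hpn]
  congr 1
  unfold pvTn pvCnt
  ring


-- tile pixel, B's tile dict (Nat-indexed), pointwise application, and output-state descriptions
def pvPix (y : List (List Int)) (bh bw BY BX i j : Nat) : Int :=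
  (y.getD (BY * bh + i) []).getD (BX * bw + j) 0

def pvLut (y : List (List Int)) (bh bw : Nat) (clip : Int) (BY BX : Nat) : PySem.Dict Int Int :=
  pvTileMap y (bh : Int) (bw : Int) clip ((bh : Int) * (bw : Int)) (BY : Int) (BX : Int)

def pvApply (y : List (List Int)) (bh bw : Nat) (clip : Int) (r c : Nat) (v : Int) : Int :=
  PySem.Dict.getD (pvLut y bh bw clip (r / bh) (c / bw)) v 0

def pvRowF (y : List (List Int)) (bh bw : Nat) (clip : Int) (dc r : Nat) : List Int :=
  (List.range (y.getD r []).length).map (fun c =>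
    if c < dc then pvApply y bh bw clip r c ((y.getD r []).getD c 0) else (y.getD r []).getD c 0)

def pvBand (y : List (List Int)) (bh bw : Nat) (clip : Int) (W BY : Nat) : List (List Int) :=
  (List.range y.length).map (fun r => if r < BY * bh then pvRowF y bh bw clip W r else y.getD r [])

def pvMid2 (y : List (List Int)) (bh bw : Nat) (clip : Int) (W BY BX I : Nat) : List (List Int) :=
  (List.range y.length).map (fun r =>
    if r < BY * bh then pvRowF y bh bw clip W r
    else if r < BY * bh + I then pvRowF y bh bw clip ((BX + 1) * bw) r
    else if r < BY * bh + bh then pvRowF y bh bw clip (BX * bw) r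
    else y.getD r [])

-- the A-side tile operation, normalised to Nat indices
def pvStepA (y : List (List Int)) (bh bw : Nat) (clip : Int) (BY BX : Nat) (out : List (List Int)) : List (List Int) :=
  let tile := (List.range bh).map (fun (i : Nat) =>
    PySem.List.slice (PySem.List.pyGetD y ((BY : Int) * (bh : Int) + (i : Int)) [])
      (some ((BX : Int) * (bw : Int))) (some ((BX : Int) * (bw : Int) + (bw : Int))))
  let enhanced := pvLocalEq (bh : Int) (bw : Int) clip tile
  (List.range bh).foldl (fun (out : List (List Int)) (i : Nat) =>
    let row := PySem.List.pyGetD out ((BY : Int) * (bh : Int) + (i : Int)) []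
    PySem.List.pySetD out ((BY : Int) * (bh : Int) + (i : Int))
      (PySem.List.slice row none (some ((BX : Int) * (bw : Int))) ++ PySem.List.pyGetD enhanced (i : Int) []
        ++ PySem.List.slice row (some ((BX : Int) * (bw : Int) + (bw : Int))) none)) out

theorem pv_A_norm (y : List (List Int)) (tile_size clip : Int) (T : Nat) (hts : tile_size = (T : Int))
    (r0 : List Int) (tl : List (List Int)) (hy : y = r0 :: tl) :
    clahe_equalization_1 y tile_size clip
      = (List.range T).foldl (fun out BY =>
          (List.range T).foldl (fun out BX => pvStepA y (y.length / T) (y.headI.length / T) clip BY BX out) out) y := by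
  subst hy hts
  simp only [clahe_equalization_1, pvStepA, PySem.List.pyGet?_zero_cons, Option.getD_some,
    PySem.Int.floordiv_natCast, PySem.List.pyRange_zero_natCast, List.foldl_map, List.map_map,
    Function.comp_def, List.headI]

-- A's tile (slice form) as a map of pixel reads
theorem pv_tile_eq (y : List (List Int)) (T bh bw w : Nat) (BY BX : Nat)
    (hrect : forall row, row ∈ y -> row.length = w)
    (hbh : T * bh <= y.length) (hbw : T * bw <= w) (hBY : BY < T) (hBX : BX < T) :
    (List.range bh).map (fun (i : Nat) =>
        PySem.List.slice (PySem.List.pyGetD y ((BY : Int) * (bh : Int) + (i : Int)) [])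
          (some ((BX : Int) * (bw : Int))) (some ((BX : Int) * (bw : Int) + (bw : Int))))
      = (List.range bh).map (fun i => (List.range bw).map (fun j => pvPix y bh bw BY BX i j)) := by
  apply List.map_congr_left
  intro i hi
  rw [List.mem_range] at hi
  have hR : BY * bh + i < y.length := by nlinarith
  have hcast : (BY : Int) * (bh : Int) + (i : Int) = ((BY * bh + i : Nat) : Int) := by push_cast; ring
  have hcast2 : (BX : Int) * (bw : Int) = ((BX * bw : Nat) : Int) := by push_cast; ring
  rw [hcast, hcast2, PySem.List.pyGetD_natCast, PySem.List.slice_natCast_add]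
  have hrow : (y.getD (BY * bh + i) []).length = w := by
    apply hrect
    rw [List.getD_eq_getElem y [] hR]
    exact List.getElem_mem hR
  rw [pv_dropTake (y.getD (BY * bh + i) []) (BX * bw) bw 0 (by rw [hrow]; nlinarith)]
  rfl

-- A's local equalisation of the tile applies exactly B's sparse tile dict to the tile
set_option maxRecDepth 8000 in
theorem pv_enhanced_eq (y : List (List Int)) (T bh bw w : Nat) (clip : Int) (BY BX : Nat)
    (hclip : 0 ≤ clip)
    (hrect : forall row, row ∈ y -> row.length = w)
    (hpix : forall row, row ∈ y -> forall p, p ∈ row -> 0 <= p ∧ p < 256)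
    (hbh : T * bh <= y.length) (hbw : T * bw <= w) (hBY : BY < T) (hBX : BX < T) :
    pvLocalEq (bh : Int) (bw : Int) clip
        ((List.range bh).map (fun i => (List.range bw).map (fun j => pvPix y bh bw BY BX i j)))
      = (List.range bh).map (fun i => (List.range bw).map (fun j =>
          PySem.Dict.getD (pvLut y bh bw clip BY BX) (pvPix y bh bw BY BX i j) 0)) := by
  set tile := (List.range bh).map (fun i => (List.range bw).map (fun j => pvPix y bh bw BY BX i j)) with htile
  have hpixbound : forall p, p ∈ tile.flatten -> 0 <= p ∧ p < 256 := by
    intro p hp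
    rw [List.mem_flatten] at hp
    obtain ⟨rowt, hrowt, hpin⟩ := hp
    rw [htile, List.mem_map] at hrowt
    obtain ⟨i, hi, rfl⟩ := hrowt
    rw [List.mem_map] at hpin
    obtain ⟨j, hj, rfl⟩ := hpin
    rw [List.mem_range] at hi hj
    have hR : BY * bh + i < y.length := by nlinarith
    have hmem : y.getD (BY * bh + i) [] ∈ y := by
      rw [List.getD_eq_getElem y [] hR]; exact List.getElem_mem hR
    have hlen : (y.getD (BY * bh + i) []).length = w := hrect _ hmem
    have hidx : BX * bw + j < (y.getD (BY * bh + i) []).length := by rw [hlen]; nlinarith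
    have hpmem : pvPix y bh bw BY BX i j ∈ y.getD (BY * bh + i) [] := by
      unfold pvPix
      rw [List.getD_eq_getElem _ 0 hidx]
      exact List.getElem_mem hidx
    exact hpix _ hmem _ hpmem
  set pix := tile.flatten with hpixdef
  -- tile pixel count
  have hlenN : pix.length = bh * bw := by
    rw [hpixdef, htile, List.length_flatten, List.map_map]
    have : ((List.range bh).map ((fun l : List Int => l.length) ∘ fun i => (List.range bw).map (fun j => pvPix y bh bw BY BX i j)))
        = (List.range bh).map (fun _ => bw) := by
      apply List.map_congr_left
      intro i _
      simp [Function.comp_def]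
    rw [this, List.map_const', List.sum_replicate, List.length_range, smul_eq_mul]
  have htot : ((bh : Int) * (bw : Int)) = (pix.length : Int) := by
    rw [hlenN]; push_cast; ring
  -- ===== A side =====
  have hhist : tile.foldl (fun h row => row.foldl (fun h p => PySem.List.pySetD h p (PySem.List.pyGetD h p 0 + 1)) h) (List.replicate 256 (0 : Int))
      = (List.range 256).map (pvCnt pix) := by
    rw [← List.foldl_flatten]
    rw [pv_hist_count pix (List.replicate 256 0) (by rw [List.length_replicate]) hpixbound]
    apply List.map_congr_left
    intro v hv
    rw [List.mem_range] at hv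
    rw [List.getD_replicate _ hv]
    unfold pvCnt
    omega
  have hexc : ((List.range 256).map (pvCnt pix)).foldl (fun s h => s + max 0 (h - clip)) 0
      = (bh : Int) * (bw : Int) - pvSd pix clip := by
    rw [PySem.List.foldl_add, List.map_map]
    have h1 : ((List.range 256).map ((fun h => max 0 (h - clip)) ∘ pvCnt pix))
        = (List.range 256).map (fun n => pvCnt pix n - pvTn pix clip n) := by
      apply List.map_congr_left
      intro n _
      simp only [Function.comp_apply]
      unfold pvTn
      have : 0 ≤ pvCnt pix n := by unfold pvCnt; positivity
      rw [min_def]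
      split_ifs <;> omega
    rw [h1, pv_sum_map_sub]
    have hcnt : (List.range 256).map (pvCnt pix) = (List.range 256).map (fun n => ((pix.count ((n : Nat) : Int) : Nat) : Int)) := rfl
    rw [hcnt, pv_count_sum pix hpixbound, htot]
    unfold pvSd
    ring
  have hclipmap : ∀ inc : Int,
      (((List.range 256).map (pvCnt pix)).map (fun h => if h > clip then clip else h)).map (fun h => h + inc)
        = (List.range 256).map (fun n => pvTn pix clip n + inc) := by
    intro inc
    rw [List.map_map, List.map_map]
    apply List.map_congr_left
    intro n _
    simp only [Function.comp_apply]
    unfold pvTn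
    congr 1
    rw [min_def]
    split_ifs <;> omega
  -- ===== B side =====
  have hfreq : (PySem.List.pyRange 0 (bh : Int) 1).foldl (fun d i =>
        (PySem.List.pyRange 0 (bw : Int) 1).foldl (fun (d : PySem.Dict Int Int) j =>
          d.insert (PySem.List.pyGetD (PySem.List.pyGetD y ((BY : Int) * (bh : Int) + i) []) ((BX : Int) * (bw : Int) + j) 0)
            (d.getD (PySem.List.pyGetD (PySem.List.pyGetD y ((BY : Int) * (bh : Int) + i) []) ((BX : Int) * (bw : Int) + j) 0) 0 + 1)) d)
        PySem.Dict.empty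
      = PySem.Dict.counter pix := by
    rw [PySem.List.pyRange_zero_natCast bh, PySem.List.pyRange_zero_natCast bw, List.foldl_map]
    have hinner : ∀ (i : Nat) (d : PySem.Dict Int Int),
        ((List.range bw).map (fun j : Nat => ((j : Nat) : Int))).foldl (fun (d : PySem.Dict Int Int) j =>
            d.insert (PySem.List.pyGetD (PySem.List.pyGetD y ((BY : Int) * (bh : Int) + ((i : Nat) : Int)) []) ((BX : Int) * (bw : Int) + j) 0)
              (d.getD (PySem.List.pyGetD (PySem.List.pyGetD y ((BY : Int) * (bh : Int) + ((i : Nat) : Int)) []) ((BX : Int) * (bw : Int) + j) 0) 0 + 1)) d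
          = ((List.range bw).map (fun j => pvPix y bh bw BY BX i j)).foldl
              (fun (d : PySem.Dict Int Int) x => d.insert x (d.getD x 0 + 1)) d := by
      intro i d
      rw [List.foldl_map, List.foldl_map]
      have hfun : (fun (d : PySem.Dict Int Int) (j : Nat) =>
            d.insert (PySem.List.pyGetD (PySem.List.pyGetD y ((BY : Int) * (bh : Int) + ((i : Nat) : Int)) []) ((BX : Int) * (bw : Int) + ((j : Nat) : Int)) 0)
              (d.getD (PySem.List.pyGetD (PySem.List.pyGetD y ((BY : Int) * (bh : Int) + ((i : Nat) : Int)) []) ((BX : Int) * (bw : Int) + ((j : Nat) : Int)) 0) 0 + 1))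
          = (fun (d : PySem.Dict Int Int) (j : Nat) => d.insert (pvPix y bh bw BY BX i j) (d.getD (pvPix y bh bw BY BX i j) 0 + 1)) := by
        funext d j
        have hc1 : (BY : Int) * (bh : Int) + ((i : Nat) : Int) = ((BY * bh + i : Nat) : Int) := by push_cast; ring
        have hc2 : (BX : Int) * (bw : Int) + ((j : Nat) : Int) = ((BX * bw + j : Nat) : Int) := by push_cast; ring
        rw [hc1, hc2, PySem.List.pyGetD_natCast, PySem.List.pyGetD_natCast]
        rfl
      rw [hfun]
    simp only [hinner]
    rw [← List.foldl_map, ← List.foldl_flatten, ← htile, ← hpixdef]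
    exact PySem.Dict.foldl_insert_getD_add_one_eq_counter pix
  have hvals : PySem.List.sorted (PySem.Dict.counter pix).keys (fun v => v) false = pvD pix := by
    rw [PySem.Dict.keys_counter]
    exact pv_vals_eq pix hpixbound
  -- ===== combine =====
  simp only [pvLocalEq, pvLut, pvTileMap]
  rw [hfreq, hhist, hvals]
  simp only [PySem.Dict.getD_counter]
  rw [hexc, hclipmap, pv_S_eq pix clip hclip,
    pv_cdfA _ (by rw [List.length_map, List.length_range]),
    ← pv_cdfm_eq pix clip ((bh : Int) * (bw : Int)) hclip htot hpixbound]
  rw [htile, List.map_map]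
  apply List.map_congr_left
  intro i hi
  rw [List.mem_range] at hi
  simp only [Function.comp_apply]
  rw [List.map_map]
  apply List.map_congr_left
  intro j hj
  rw [List.mem_range] at hj
  simp only [Function.comp_apply]
  set p := pvPix y bh bw BY BX i j with hpdef
  have hpm : p ∈ pix := by
    rw [hpixdef, List.mem_flatten]
    refine ⟨(List.range bw).map (fun j => pvPix y bh bw BY BX i j), ?_, ?_⟩
    · rw [htile]
      exact List.mem_map_of_mem (List.mem_range.mpr hi)
    · exact List.mem_map_of_mem (List.mem_range.mpr hj)
  obtain ⟨hp0, hp1⟩ := hpixbound p hpm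
  have hpn : p = ((p.toNat : Nat) : Int) := by omega
  have hn : p.toNat < 256 := by omega
  by_cases hcase : (bh : Int) * (bw : Int)
      = ((pvPrefix ((List.range 256).map (fun n => pvTn pix clip n
          + PySem.Int.floordiv ((bh : Int) * (bw : Int) - pvSd pix clip) 256))).find? (fun c => decide (0 < c))).getD 0
  · rw [if_pos hcase, if_pos hcase, pv_fold_id pix hpixbound p hpm]
    rw [hpn, PySem.List.pyGetD_natCast, PySem.List.getD_map_range _ _ _ _ hn]
  · rw [if_neg hcase, if_neg hcase, pv_fold_val pix clip _ _ _ hclip hpixbound p p.toNat hpn hn hpm]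
    rw [hpn, PySem.List.pyGetD_natCast, PySem.List.getD_map_range _ _ _ _ hn,
      pv_prefix_entry _ p.toNat hn]
    rw [PySem.List.sum_map_add_int, PySem.List.sum_map_const_int]
    congr 1
    simp only [Int.toNat_natCast, List.length_range]
    push_cast
    ring

theorem pvRowF_zero (y : List (List Int)) (bh bw : Nat) (clip : Int) (r : Nat) :
    pvRowF y bh bw clip 0 r = y.getD r [] := by
  simpa [pvRowF] using pv_map_range_getD (y.getD r []) 0

theorem pvBand_zero (y : List (List Int)) (bh bw : Nat) (clip : Int) (W : Nat) :
    pvBand y bh bw clip W 0 = y := by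
  have := pv_map_range_getD y []
  simpa [pvBand] using this

theorem pvMid2_start (y : List (List Int)) (bh bw : Nat) (clip : Int) (W BY : Nat) :
    pvMid2 y bh bw clip W BY 0 0 = pvBand y bh bw clip W BY := by
  unfold pvMid2 pvBand
  apply List.map_congr_left
  intro r _
  split_ifs with h1 h2 h3 <;> try rfl
  all_goals simp_all [pvRowF_zero] <;> omega

theorem pvMid2_finish (y : List (List Int)) (bh bw : Nat) (clip : Int) (W BY T : Nat) (hW : W = T * bw) :
    pvMid2 y bh bw clip W BY T 0 = pvBand y bh bw clip W (BY + 1) := by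
  unfold pvMid2 pvBand
  apply List.map_congr_left
  intro r _
  subst hW
  have hsm : (BY + 1) * bh = BY * bh + bh := by ring
  rw [hsm]
  split_ifs <;> first | rfl | (exfalso; omega)

theorem pvMid2_nextBX (y : List (List Int)) (bh bw : Nat) (clip : Int) (W BY BX : Nat) :
    pvMid2 y bh bw clip W BY BX bh = pvMid2 y bh bw clip W BY (BX + 1) 0 := by
  unfold pvMid2
  apply List.map_congr_left
  intro r _
  split_ifs <;> first | rfl | (exfalso; omega)

theorem pv_eq_of_getD {a : Type} (d : a) {l1 l2 : List a} (hlen : l1.length = l2.length)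
    (h : forall c, c < l1.length -> l1.getD c d = l2.getD c d) : l1 = l2 := by
  apply List.ext_getElem hlen
  intro i h1 h2
  have hx := h i h1
  rwa [List.getD_eq_getElem _ _ h1, List.getD_eq_getElem _ _ h2] at hx

theorem pv_getD_take {a : Type} (l : List a) (d : a) {s c : Nat} (h : c < s) :
    (l.take s).getD c d = l.getD c d := by
  simp [List.getD, List.getElem?_take, h]

theorem pv_getD_drop {a : Type} (l : List a) (d : a) (s c : Nat) :
    (l.drop s).getD c d = l.getD (s + c) d := by
  simp [List.getD, List.getElem?_drop]

theorem pv_getD_append {a : Type} (l1 l2 : List a) (d : a) (c : Nat) (h : c < l1.length) :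
    (l1 ++ l2).getD c d = l1.getD c d := by
  simp [List.getD, List.getElem?_append_left h]

theorem pv_getD_append_right {a : Type} (l1 l2 : List a) (d : a) (c : Nat) (h : l1.length <= c) :
    (l1 ++ l2).getD c d = l2.getD (c - l1.length) d := by
  simp [List.getD, List.getElem?_append_right h]

theorem pvRowF_getD (y : List (List Int)) (bh bw : Nat) (clip : Int) (dc r c : Nat)
    (h : c < (y.getD r []).length) :
    (pvRowF y bh bw clip dc r).getD c 0
      = if c < dc then pvApply y bh bw clip r c ((y.getD r []).getD c 0) else (y.getD r []).getD c 0 := by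
  unfold pvRowF
  rw [PySem.List.getD_map_range _ _ _ _ (by simpa using h)]

theorem pvRowF_length (y : List (List Int)) (bh bw : Nat) (clip : Int) (dc r : Nat) :
    (pvRowF y bh bw clip dc r).length = (y.getD r []).length := by
  unfold pvRowF
  rw [List.length_map, List.length_range]

-- one row write inside a tile
theorem pv_write_step (y : List (List Int)) (T bh bw w : Nat) (clip : Int) (W BY BX I : Nat)
    (hrect : forall row, row ∈ y -> row.length = w)
    (hbh : T * bh <= y.length) (hbw : T * bw <= w)
    (hBY : BY < T) (hBX : BX < T) (hI : I < bh) (hW : W = T * bw) :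
    (PySem.List.pySetD (pvMid2 y bh bw clip W BY BX I) ((BY : Int) * (bh : Int) + (I : Int))
      (PySem.List.slice (PySem.List.pyGetD (pvMid2 y bh bw clip W BY BX I) ((BY : Int) * (bh : Int) + (I : Int)) [])
          none (some ((BX : Int) * (bw : Int)))
        ++ (List.range bw).map (fun j => PySem.Dict.getD (pvLut y bh bw clip BY BX) (pvPix y bh bw BY BX I j) 0)
        ++ PySem.List.slice (PySem.List.pyGetD (pvMid2 y bh bw clip W BY BX I) ((BY : Int) * (bh : Int) + (I : Int)) [])
          (some ((BX : Int) * (bw : Int) + (bw : Int))) none))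
      = pvMid2 y bh bw clip W BY BX (I + 1) := by
  have hbh0 : 0 < bh := by omega
  have hR : BY * bh + I < y.length := by nlinarith
  have hcastR : (BY : Int) * (bh : Int) + (I : Int) = ((BY * bh + I : Nat) : Int) := by push_cast; ring
  have hc2 : ((BX : Int) * (bw : Int)) = ((BX * bw : Nat) : Int) := by push_cast; ring
  have hc3 : (((BX * bw : Nat) : Int) + (bw : Int)) = ((BX * bw + bw : Nat) : Int) := by push_cast; ring
  rw [hcastR, hc2, hc3, PySem.List.pyGetD_natCast, PySem.List.pySetD_natCast,
    PySem.List.slice_to_natCast, PySem.List.slice_from_natCast]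
  have hrowval : (pvMid2 y bh bw clip W BY BX I).getD (BY * bh + I) []
      = pvRowF y bh bw clip (BX * bw) (BY * bh + I) := by
    unfold pvMid2
    rw [PySem.List.getD_map_range _ _ _ _ hR]
    rw [if_neg (by omega), if_neg (by omega), if_pos (by omega)]
  rw [hrowval]
  have hry : (y.getD (BY * bh + I) []).length = w := by
    apply hrect
    rw [List.getD_eq_getElem y [] hR]
    exact List.getElem_mem hR
  have hrl : (pvRowF y bh bw clip (BX * bw) (BY * bh + I)).length = w := by
    rw [pvRowF_length, hry]
  have hle : BX * bw + bw <= w := by nlinarith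
  have hnew : ((pvRowF y bh bw clip (BX * bw) (BY * bh + I)).take (BX * bw)
        ++ (List.range bw).map (fun j => PySem.Dict.getD (pvLut y bh bw clip BY BX) (pvPix y bh bw BY BX I j) 0)
        ++ (pvRowF y bh bw clip (BX * bw) (BY * bh + I)).drop (BX * bw + bw))
      = pvRowF y bh bw clip ((BX + 1) * bw) (BY * bh + I) := by
    have hlen_take : ((pvRowF y bh bw clip (BX * bw) (BY * bh + I)).take (BX * bw)).length = BX * bw := by
      rw [List.length_take, hrl]; omega
    apply pv_eq_of_getD (0 : Int)
    · simp only [List.length_append, List.length_take, List.length_drop, List.length_map,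
        List.length_range, hrl, pvRowF_length, hry]
      omega
    · intro c hc
      have hcw : c < w := by
        simp only [List.length_append, List.length_take, List.length_drop, List.length_map,
          List.length_range, hrl] at hc
        omega
      have hcy : c < (y.getD (BY * bh + I) []).length := by rw [hry]; exact hcw
      rw [pvRowF_getD y bh bw clip ((BX + 1) * bw) (BY * bh + I) c hcy]
      have hsm : (BX + 1) * bw = BX * bw + bw := by ring
      rcases Nat.lt_or_ge c (BX * bw) with hc1 | hc1
      · rw [pv_getD_append _ _ _ _ (by rw [List.length_append, hlen_take]; simp; omega)]
        rw [pv_getD_append _ _ _ _ (by rw [hlen_take]; omega)]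
        rw [pv_getD_take _ _ hc1, pvRowF_getD y bh bw clip (BX * bw) (BY * bh + I) c hcy]
        rw [if_pos hc1, if_pos (by omega)]
      · rcases Nat.lt_or_ge c (BX * bw + bw) with hc2' | hc2'
        · have hbw0 : 0 < bw := by omega
          rw [pv_getD_append _ _ _ _ (by rw [List.length_append, hlen_take]; simp; omega)]
          rw [pv_getD_append_right _ _ _ _ (by rw [hlen_take]; omega), hlen_take]
          rw [PySem.List.getD_map_range _ _ _ _ (by omega : c - BX * bw < bw)]
          rw [if_pos (by omega)]
          have hdiv1 : (BY * bh + I) / bh = BY := by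
            rw [Nat.mul_comm BY bh, Nat.mul_add_div hbh0, Nat.div_eq_of_lt hI]
            omega
          have hdiv2 : c / bw = BX := by
            have hceq : c = bw * BX + (c - BX * bw) := by rw [Nat.mul_comm]; omega
            rw [hceq, Nat.mul_add_div hbw0, Nat.div_eq_of_lt (by omega)]
            omega
          unfold pvPix pvApply
          rw [hdiv1, hdiv2]
          have : BX * bw + (c - BX * bw) = c := by omega
          rw [this]
        · rw [pv_getD_append_right _ _ _ _ (by rw [List.length_append, hlen_take]; simp; omega)]
          rw [List.length_append, hlen_take, List.length_map, List.length_range]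
          rw [pv_getD_drop]
          have : BX * bw + bw + (c - (BX * bw + bw)) = c := by omega
          rw [this, pvRowF_getD y bh bw clip (BX * bw) (BY * bh + I) c hcy]
          rw [if_neg (by omega), if_neg (by omega)]
  rw [hnew]
  apply pv_eq_of_getD ([] : List Int)
  · simp only [List.length_set, pvMid2, List.length_map, List.length_range]
  · intro r hrn
    have hrn' : r < y.length := by
      simpa only [List.length_set, pvMid2, List.length_map, List.length_range] using hrn
    have hRlen : BY * bh + I < (pvMid2 y bh bw clip W BY BX I).length := by
      simpa only [pvMid2, List.length_map, List.length_range] using hR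
    have hsetD : ((pvMid2 y bh bw clip W BY BX I).set (BY * bh + I) (pvRowF y bh bw clip ((BX + 1) * bw) (BY * bh + I))).getD r []
        = if BY * bh + I = r then pvRowF y bh bw clip ((BX + 1) * bw) (BY * bh + I)
          else (pvMid2 y bh bw clip W BY BX I).getD r [] := by
      simp only [List.getD, List.getElem?_set, hRlen, if_true]
      split_ifs with hx
      · simp
      · rfl
    rw [hsetD]
    by_cases hx : BY * bh + I = r
    · rw [if_pos hx]
      unfold pvMid2
      rw [PySem.List.getD_map_range _ _ _ _ hrn']
      rw [if_neg (by omega), if_pos (by omega), ← hx]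
    · rw [if_neg hx]
      unfold pvMid2
      rw [PySem.List.getD_map_range _ _ _ _ hrn', PySem.List.getD_map_range _ _ _ _ hrn']
      split_ifs <;> first | rfl | (exfalso; omega)

-- one whole tile
theorem pv_stepA_eq (y : List (List Int)) (T bh bw w : Nat) (clip : Int) (W BY BX : Nat)
    (hclip : 0 ≤ clip)
    (hrect : forall row, row ∈ y -> row.length = w)
    (hpix : forall row, row ∈ y -> forall p, p ∈ row -> 0 <= p ∧ p < 256)
    (hbh : T * bh <= y.length) (hbw : T * bw <= w)
    (hBY : BY < T) (hBX : BX < T) (hW : W = T * bw) :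
    pvStepA y bh bw clip BY BX (pvMid2 y bh bw clip W BY BX 0) = pvMid2 y bh bw clip W BY (BX + 1) 0 := by
  simp only [pvStepA, pv_tile_eq y T bh bw w BY BX hrect hbh hbw hBY hBX,
    pv_enhanced_eq y T bh bw w clip BY BX hclip hrect hpix hbh hbw hBY hBX]
  rw [← pvMid2_nextBX y bh bw clip W BY BX]
  refine pv_foldl_range_inv _ (fun I => pvMid2 y bh bw clip W BY BX I) bh ?_
  intro I hI
  have hseg : PySem.List.pyGetD ((List.range bh).map (fun i => (List.range bw).map (fun j =>
        PySem.Dict.getD (pvLut y bh bw clip BY BX) (pvPix y bh bw BY BX i j) 0))) (I : Int) []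
      = (List.range bw).map (fun j => PySem.Dict.getD (pvLut y bh bw clip BY BX) (pvPix y bh bw BY BX I j) 0) := by
    rw [PySem.List.pyGetD_natCast, PySem.List.getD_map_range _ _ _ _ hI]
  simp only [hseg]
  exact pv_write_step y T bh bw w clip W BY BX I hrect hbh hbw hBY hBX hI hW

-- one band of tiles
theorem pv_band_eq (y : List (List Int)) (T bh bw w : Nat) (clip : Int) (W BY : Nat)
    (hclip : 0 ≤ clip)
    (hrect : forall row, row ∈ y -> row.length = w)
    (hpix : forall row, row ∈ y -> forall p, p ∈ row -> 0 <= p ∧ p < 256)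
    (hbh : T * bh <= y.length) (hbw : T * bw <= w)
    (hBY : BY < T) (hW : W = T * bw) :
    (List.range T).foldl (fun out BX => pvStepA y bh bw clip BY BX out) (pvBand y bh bw clip W BY)
      = pvBand y bh bw clip W (BY + 1) := by
  have hmain := pv_foldl_range_inv
    (fun out BX => pvStepA y bh bw clip BY BX out)
    (fun BX => pvMid2 y bh bw clip W BY BX 0) T
    (fun BX hBX => pv_stepA_eq y T bh bw w clip W BY BX hclip hrect hpix hbh hbw hBY hBX hW)
  dsimp only at hmain
  rw [pvMid2_start, pvMid2_finish y bh bw clip W BY T hW] at hmain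
  exact hmain

-- B's port evaluates to the pointwise description
theorem pv_B_norm (y : List (List Int)) (tile_size clip : Int) (T w : Nat) (hts : tile_size = (T : Int))
    (r0 : List Int) (tl : List (List Int)) (hy : y = r0 :: tl)
    (hw0 : r0.length = w) :
    clahe_equalization_1_alt y tile_size clip
      = pvBand y (y.length / T) (w / T) clip (T * (w / T)) T := by
  subst hy hts
  simp only [clahe_equalization_1_alt, PySem.List.pyGet?_zero_cons, Option.getD_some,
    PySem.Int.floordiv_natCast, PySem.List.pyRange_zero_natCast, List.map_map, Function.comp_def, hw0]
  rw [PySem.List.enumerate_eq_map_pyRange _ ([] : List Int), PySem.List.len_eq,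
    PySem.List.pyRange_zero_natCast, List.map_map, List.map_map]
  simp only [Function.comp_def]
  unfold pvBand
  apply List.map_congr_left
  intro r hr
  rw [List.mem_range] at hr
  simp only [Function.comp_def, PySem.List.pyGetD_natCast]
  have hH : ((T : Int) * ((((r0 :: tl : List (List Int)).length / T : Nat)) : Int)) = (((T * ((r0 :: tl : List (List Int)).length / T) : Nat)) : Int) := by
    push_cast; ring
  simp only [hH, Nat.cast_lt]
  split_ifs with h
  · rw [PySem.List.enumerate_eq_map_pyRange _ (0 : Int), PySem.List.len_eq,
      PySem.List.pyRange_zero_natCast, List.map_map, List.map_map]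
    unfold pvRowF
    apply List.map_congr_left
    intro c hc
    rw [List.mem_range] at hc
    simp only [Function.comp_def, PySem.List.pyGetD_natCast]
    have hW2 : ((T : Int) * (((w / T : Nat)) : Int)) = (((T * (w / T) : Nat)) : Int) := by push_cast; ring
    simp only [hW2, Nat.cast_lt]
    split_ifs with h2
    · have hbh0 : 0 < (r0 :: tl : List (List Int)).length / T := by
        rcases Nat.eq_zero_or_pos ((r0 :: tl : List (List Int)).length / T) with h0 | h0
        · rw [h0, Nat.mul_zero] at h; omega
        · exact h0
      have hbw0 : 0 < w / T := by
        rcases Nat.eq_zero_or_pos (w / T) with h0 | h0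
        · rw [h0, Nat.mul_zero] at h2; omega
        · exact h0
      have hdr : r / ((r0 :: tl : List (List Int)).length / T) < T :=
        (Nat.div_lt_iff_lt_mul hbh0).mpr h
      have hdc : c / (w / T) < T := (Nat.div_lt_iff_lt_mul hbw0).mpr h2
      rw [PySem.Int.floordiv_natCast, PySem.Int.floordiv_natCast]
      simp only [PySem.List.pyGetD_natCast]
      rw [PySem.List.getD_map_range _ _ _ _ hdr, PySem.List.getD_map_range _ _ _ _ hdc]
      rfl
    · rfl
  · rfl

-- degenerate-grid lemmas: when the tile grid is empty in a dimension both programs return the input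
theorem pv_foldl_const {a b : Type} (l : List b) (x : a) : l.foldl (fun x _ => x) x = x := by
  induction l with
  | nil => rfl
  | cons _ t ih => exact ih

theorem pv_set_getD_self {a : Type} (l : List a) (n : Nat) (d : a) (h : n < l.length) :
    l.set n (l.getD n d) = l := by
  apply List.ext_getElem (by simp)
  intro i h1 h2
  rw [List.getElem_set]
  split_ifs with he
  · subst he
    rw [List.getD_eq_getElem _ _ h]
  · rfl

theorem pv_stepA_bh0 (y : List (List Int)) (bw : Nat) (clip : Int) (BY BX : Nat)
    (out : List (List Int)) : pvStepA y 0 bw clip BY BX out = out := by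
  simp [pvStepA]

theorem pv_stepA_bw0 (y : List (List Int)) (T bh : Nat) (clip : Int) (BY BX : Nat)
    (hbh : T * bh <= y.length) (hBY : BY < T) :
    pvStepA y bh 0 clip BY BX y = y := by
  have htile0 : (List.range bh).map (fun (i : Nat) =>
      PySem.List.slice (PySem.List.pyGetD y ((BY : Int) * (bh : Int) + (i : Int)) [])
        (some ((BX : Int) * ((0 : Nat) : Int))) (some ((BX : Int) * ((0 : Nat) : Int) + ((0 : Nat) : Int))))
      = (List.range bh).map (fun _ => ([] : List Int)) := by
    apply List.map_congr_left
    intro i _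
    have hc2 : (BX : Int) * ((0 : Nat) : Int) = ((BX * 0 : Nat) : Int) := by push_cast; ring
    rw [hc2, PySem.List.slice_natCast_add]
    simp
  have henh : pvLocalEq (bh : Int) ((0 : Nat) : Int) clip ((List.range bh).map (fun _ => ([] : List Int)))
      = (List.range bh).map (fun _ => ([] : List Int)) := by
    simp only [pvLocalEq]
    rw [List.map_map]
    apply List.map_congr_left
    intro i _
    rfl
  simp only [pvStepA, htile0, henh]
  refine pv_foldl_range_inv _ (fun _ => y) bh ?_
  intro I hI
  have hidx : BY * bh + I < y.length := by nlinarith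
  have hcastR : (BY : Int) * (bh : Int) + (I : Int) = ((BY * bh + I : Nat) : Int) := by push_cast; ring
  have hseg : PySem.List.pyGetD ((List.range bh).map (fun _ => ([] : List Int))) (I : Int) [] = [] := by
    rw [PySem.List.pyGetD_natCast, PySem.List.getD_map_range _ _ _ _ hI]
  have hc2 : (BX : Int) * ((0 : Nat) : Int) = ((BX * 0 : Nat) : Int) := by push_cast; ring
  have hc3 : ((BX * 0 : Nat) : Int) + ((0 : Nat) : Int) = ((BX * 0 + 0 : Nat) : Int) := by push_cast; ring
  rw [hseg, hcastR, hc2, hc3, PySem.List.pyGetD_natCast, PySem.List.pySetD_natCast,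
    PySem.List.slice_to_natCast, PySem.List.slice_from_natCast]
  simp only [Nat.mul_zero, Nat.add_zero, List.take_zero, List.drop_zero, List.nil_append,
    List.append_nil]
  exact pv_set_getD_self y (BY * bh + I) [] hidx

theorem pvBand_full_bh0 (y : List (List Int)) (bw : Nat) (clip : Int) (W T : Nat) :
    pvBand y 0 bw clip W T = y := by
  unfold pvBand
  have h1 : (List.range y.length).map (fun r => if r < T * 0 then pvRowF y 0 bw clip W r else y.getD r [])
      = (List.range y.length).map (fun r => y.getD r []) := by
    apply List.map_congr_left
    intro r _
    rw [if_neg (by omega)]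
  rw [h1, pv_map_range_getD]

theorem pvBand_full_bw0 (y : List (List Int)) (bh : Nat) (clip : Int) (T : Nat) :
    pvBand y bh 0 clip (T * 0) T = y := by
  unfold pvBand
  have h1 : (List.range y.length).map (fun r => if r < T * bh then pvRowF y bh 0 clip (T * 0) r else y.getD r [])
      = (List.range y.length).map (fun r => y.getD r []) := by
    apply List.map_congr_left
    intro r _
    split_ifs with h
    · rw [show T * 0 = 0 by omega, pvRowF_zero]
    · rfl
  rw [h1, pv_map_range_getD]

-- ===== VERDICT (by name: the statement is the Claim_ definition above) =====
theorem clahe_equalization_1_spec : Claim_equal_clahe_equalization_1 := by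
  intro y ts clip hdom hpre
  obtain ⟨hne, hts1, hdisj⟩ := hpre
  obtain ⟨r0, tl, rfl⟩ : ∃ r0 tl, y = r0 :: tl := by
    cases y with
    | nil => exact absurd rfl hne
    | cons a l => exact ⟨a, l, rfl⟩
  set y := r0 :: tl with hy
  have hts : ts = ((ts.toNat : Nat) : Int) := (Int.toNat_of_nonneg (by omega)).symm
  set T := ts.toNat with hT
  set w := (r0 :: tl : List (List Int)).headI.length with hw
  have hw0 : r0.length = w := rfl
  show clahe_equalization_1 y ts clip = clahe_equalization_1_alt y ts clip
  rw [pv_A_norm y ts clip T hts r0 tl hy, pv_B_norm y ts clip T w hts r0 tl hy hw0]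
  have hwhead : y.headI.length = w := rfl
  rw [hwhead]
  rcases hdisj with h1 | h2 | hmain
  · -- image has fewer rows than tile_size: every tile is empty, both sides return y
    have hbh0 : y.length / T = 0 := Nat.div_eq_of_lt (by omega)
    rw [hbh0, pvBand_full_bh0]
    have hid : ∀ (out : List (List Int)) (BY : Nat),
        (List.range T).foldl (fun out BX => pvStepA y 0 (w / T) clip BY BX out) out = out := by
      intro out BY
      simp only [pv_stepA_bh0]
      exact pv_foldl_const _ _
    simp only [hid]
    exact pv_foldl_const _ _
  · -- rows are shorter than tile_size: every tile has width 0, both sides return y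
    have hbw0 : w / T = 0 := Nat.div_eq_of_lt (by rw [← hw0]; omega)
    have hbh : T * (y.length / T) <= y.length := Nat.mul_div_le y.length T |>.trans_eq' (by rw [Nat.mul_comm])
    rw [hbw0, pvBand_full_bw0]
    have hid : ∀ (BY : Nat), BY < T →
        (List.range T).foldl (fun out BX => pvStepA y (y.length / T) 0 clip BY BX out) y = y := by
      intro BY hBY
      refine pv_foldl_range_inv _ (fun _ => y) T ?_
      intro BX _
      exact pv_stepA_bw0 y T (y.length / T) clip BY BX hbh hBY
    refine pv_foldl_range_inv _ (fun _ => y) T ?_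
    intro BY hBY
    exact hid BY hBY
  · -- the main rectangular 0..255 case: tile-by-tile equality
    obtain ⟨hclip, hrect0, hpix0⟩ := hmain
    have hrect : forall row, row ∈ y -> row.length = w := fun row hr => hrect0 row hr
    have hpix : forall row, row ∈ y -> forall p, p ∈ row -> 0 <= p ∧ p < 256 := by
      intro row hr p hp
      have := hpix0 row hr p hp
      omega
    have hbh : T * (y.length / T) <= y.length := Nat.mul_div_le y.length T |>.trans_eq' (by rw [Nat.mul_comm])
    have hbw : T * (w / T) <= w := Nat.mul_div_le w T |>.trans_eq' (by rw [Nat.mul_comm])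
    have hmain2 := pv_foldl_range_inv
      (fun out BY => (List.range T).foldl (fun out BX => pvStepA y (y.length / T) (w / T) clip BY BX out) out)
      (fun BY => pvBand y (y.length / T) (w / T) clip (T * (w / T)) BY) T
      (fun BY hBY => pv_band_eq y T (y.length / T) (w / T) w clip (T * (w / T)) BY hclip hrect hpix hbh hbw hBY rfl)
    dsimp only at hmain2
    rw [pvBand_zero] at hmain2
    exact hmain2
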